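-- pv_equiv track=rewrite | github.com/1223v/Algorithm | programmers/99club/150367_binarytree.py | solution
-- ===== SOURCE A (Python) =====
-- def dfs(b, i, depth):
--     if depth == 0: # 리프 노드에 도달했다면
--         return True # 포화 이진트리
--
--     # 부모노드가 '0' 일때,
--     # 왼쪽 자식 노드가 '1' 이거나 오른쪽 자식 노드가 '1' 이라면 포화 이진트리가 될 수 없음
--     elif b[i] == '0':
--         if b[i - depth] == '1' or b[i + depth] == '1':
--             return False
--     # 왼쪽 서브트리 탐색
--     left = dfs(b, i - depth, depth // 2)
--     # 오른쪽 서브트리 탐색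
--     right = dfs(b, i + depth, depth // 2)
--     return left and right
--
-- def solution(numbers):
--     answer = []
--     for num in numbers: # num = 42
--         b = bin(num)[2:] # b = 101010 / len(b) = 6
--         nodes = bin(len(b) + 1)[2:] # nodes = 7 = 111
--
--         # 포화 이진트리가 아닌 경우 더미 노드 0 추가
--         if '1' in nodes[1:]:
--             tmp = int('0b1' + '0' * len(nodes),2) - int('0b' + nodes, 2)
--             b = '0' * tmp + b
--
--         # 이미 포화 이진 트리 인경우
--         result = dfs(b, len(b)//2, (len(b)+1)//4)
--         answer.append(1 if result else 0)
--
--     return answer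
-- ===== SOURCE B (Python) =====
-- def solution(numbers):
--     # Bottom-up iterative check: pad the binary string to a perfect-tree length,
--     # then repeatedly check the lowest internal level and strip the leaves.
--     return [check(num) for num in numbers]
--
-- def check(num):
--     b = bin(num)[2:]
--     size = 1
--     while size < len(b) + 1:
--         size += size
--     s = '0' * (size - 1 - len(b)) + b
--     ok = 1
--     while len(s) > 1:
--         t = s
--         while len(t) >= 3:
--             if t[1] == '0' and (t[0] == '1' or t[2] == '1'):
--                 ok = 0
--             t = t[4:]
--         s = s[1::2]
--     return ok
-- ===== Notes on version B (the rewrite author's own statement) =====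
-- stated objective: alternative
-- what changed: A validates the padded in-order binary string with a top-down recursive dfs (node index and halving step, conjoining subtree results); B instead checks it bottom-up iteratively: it scans the lowest internal level (indices 1, 5, 9, ...) for a '0' parent with a '1' child, then strips the leaves via s[1::2] and repeats, and it computes the padding length with a doubling loop instead of A's bin()/int() string arithmetic.
import Mathlib
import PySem

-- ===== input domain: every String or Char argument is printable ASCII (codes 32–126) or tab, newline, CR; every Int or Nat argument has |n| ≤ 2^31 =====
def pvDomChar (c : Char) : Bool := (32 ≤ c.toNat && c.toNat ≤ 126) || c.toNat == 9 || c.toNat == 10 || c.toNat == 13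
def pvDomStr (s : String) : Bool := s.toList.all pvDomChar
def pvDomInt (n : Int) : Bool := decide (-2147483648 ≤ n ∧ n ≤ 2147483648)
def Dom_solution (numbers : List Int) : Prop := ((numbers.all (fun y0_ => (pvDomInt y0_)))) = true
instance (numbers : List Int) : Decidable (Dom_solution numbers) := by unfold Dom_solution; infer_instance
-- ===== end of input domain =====

-- B replaces A's top-down recursive dfs by a bottom-up iterative scan (check the lowest
-- internal level of the padded string, then strip the leaves and repeat); objective: alternative.

-- ===== PORT A =====
-- helper: the binary digits of a natural number, most significant first ([] for 0)
def bitsA (m : Nat) : List Char :=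
  if _h : m = 0 then [] else bitsA (m / 2) ++ [if m % 2 = 1 then '1' else '0']
decreasing_by exact Nat.div_lt_self (by omega) (by omega)

def binDigits (m : Nat) : List Char := if m = 0 then ['0'] else bitsA m

-- bin(num) as a char list ("-0b…" for negatives, "0b…" otherwise); exact for Python's bin
def pyBin (num : Int) : List Char :=
  if num < 0 then '-' :: '0' :: 'b' :: binDigits (-num).toNat
  else '0' :: 'b' :: binDigits num.toNat

-- int(s, 2) on the '0b'-prefixed binary literals A builds ('0' and 'b' both contribute 0, as in Python's prefix handling)
def parseBin (s : List Char) : Int :=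
  s.foldl (fun a c => 2 * a + (if c == '1' then 1 else 0)) 0

-- A's dummy-zero padding block (nodes / tmp computation)
def padA (b : List Char) : List Char :=
  let nodes := binDigits (b.length + 1)
  if (PySem.List.slice nodes (some 1) none).contains '1' then
    let tmp : Int := parseBin ('0' :: 'b' :: '1' :: List.replicate nodes.length '0') -
      parseBin ('0' :: 'b' :: nodes)
    List.replicate tmp.toNat '0' ++ b
  else b

-- A's dfs; fuel only makes the recursion on the Int depth structural (on A's calls the
-- depth halves to 0, so any fuel ≥ the tree height is exact); the out-of-range default 'x'
-- is never read on A's calls (all indices stay inside the padded string)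
def dfsA (fuel : Nat) (b : List Char) (i depth : Int) : Bool :=
  match fuel with
  | 0 => true
  | fuel + 1 =>
    if depth = 0 then true
    else if PySem.List.pyGetD b i 'x' == '0' &&
        (PySem.List.pyGetD b (i - depth) 'x' == '1' ||
         PySem.List.pyGetD b (i + depth) 'x' == '1') then false
    else dfsA fuel b (i - depth) (PySem.Int.floordiv depth 2) &&
         dfsA fuel b (i + depth) (PySem.Int.floordiv depth 2)

def solveOneA (num : Int) : Int :=
  let b := PySem.List.slice (pyBin num) (some 2) none  -- bin(num)[2:]
  let b2 := padA b
  if dfsA b2.length b2 (PySem.Int.floordiv (b2.length : Int) 2)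
      (PySem.Int.floordiv ((b2.length : Int) + 1) 4) then 1 else 0

def solution (numbers : List Int) : List Int :=
  numbers.foldl (fun answer num => answer ++ [solveOneA num]) []

-- ===== PORT B =====
-- B's doubling loop: smallest power of two ≥ n+1 (fuel bounds the loop; n+2 always suffices)
def findSize (fuel : Nat) (size : Nat) (n : Nat) : Nat :=
  match fuel with
  | 0 => size
  | fuel + 1 => if size < n + 1 then findSize fuel (size + size) n else size

-- s[1::2] (extended slice with step 2, hand-ported: every second element from index 1; exact)
def strip (s : List Char) : List Char :=
  match s with
  | _ :: b :: rest => b :: strip rest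
  | _ => []

-- needed by loopB's termination: len(s[1::2]) = len(s) // 2
theorem strip_length (s : List Char) : (strip s).length = s.length / 2 := by
  induction s using strip.induct with
  | case1 a b rest ih => simp [strip, ih]; omega
  | case2 s h => cases s with
    | nil => simp [strip]
    | cons a t => cases t with
      | nil => simp [strip]
      | cons x y => exact absurd rfl (h a x y)

-- B's inner while loop over t (bottom internal nodes at indices 1, 5, 9, …);
-- Python's int flag ok (1/0) is ported as a Bool (true/1, false/0)
def chunkCheck (t : List Char) (ok : Bool) : Bool :=
  if 3 ≤ t.length then
    chunkCheck (t.drop 4)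
      (if PySem.List.pyGetD t 1 'x' == '0' &&
          (PySem.List.pyGetD t 0 'x' == '1' || PySem.List.pyGetD t 2 'x' == '1')
       then false else ok)
  else ok
termination_by t.length
decreasing_by simp; omega

-- B's outer while loop
def loopB (s : List Char) (ok : Bool) : Bool :=
  if 1 < s.length then loopB (strip s) (chunkCheck s ok) else ok
termination_by s.length
decreasing_by rw [strip_length]; omega

-- B's padding to the next perfect-tree length
def padB (b : List Char) : List Char :=
  let size := findSize (b.length + 2) 1 b.length
  List.replicate ((size : Int) - 1 - (b.length : Int)).toNat '0' ++ b

def checkB (num : Int) : Int :=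
  let b := PySem.List.slice (pyBin num) (some 2) none  -- bin(num)[2:]
  let s := padB b
  if loopB s true then 1 else 0

def solution_alt (numbers : List Int) : List Int := numbers.map checkB

-- ===== PRECONDITION & SPEC =====
def Spec_solution (numbers : List Int) (out : List Int) : Prop := out = solution_alt numbers
instance (numbers : List Int) (out : List Int) : Decidable (Spec_solution numbers out) := by unfold Spec_solution; infer_instance

-- ===== CLAIM (what is proved, stated in full; the proofs are below) =====
def Claim_equal_solution : Prop := ∀ (numbers : List Int), Dom_solution numbers → Spec_solution numbers (solution numbers)

-- ===== LEMMAS AND PROOFS =====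

-- proof-side view of B's two loops: per-level conjunction
def Vb (s : List Char) : Bool :=
  if 1 < s.length then chunkCheck s true && Vb (strip s) else true
termination_by s.length
decreasing_by rw [strip_length]; omega

theorem bitsA_bounds (m : Nat) (hm : 1 ≤ m) :
    2 ^ ((bitsA m).length - 1) ≤ m ∧ m < 2 ^ (bitsA m).length ∧ 1 ≤ (bitsA m).length := by
  induction m using Nat.strong_induction_on with
  | _ m ih =>
    rw [bitsA]
    rw [dif_neg (by omega)]
    by_cases h2 : m / 2 = 0
    · have : m = 1 := by omega
      subst this
      simp [bitsA]
    · have ihm := ih (m / 2) (Nat.div_lt_self (by omega) (by omega)) (by omega)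
      simp only [List.length_append, List.length_singleton]
      set L := (bitsA (m / 2)).length with hL
      have hp : 2 ^ (L + 1 - 1) = 2 ^ (L - 1) * 2 := by
        rw [show L + 1 - 1 = (L - 1) + 1 by omega, pow_succ]
      have hp2 : 2 ^ (L + 1) = 2 ^ L * 2 := by rw [pow_succ]
      omega

theorem bitsA_head (m : Nat) (hm : 1 ≤ m) : ∃ tl, bitsA m = '1' :: tl := by
  induction m using Nat.strong_induction_on with
  | _ m ih =>
    rw [bitsA, dif_neg (by omega)]
    by_cases h2 : m / 2 = 0
    · have : m = 1 := by omega
      subst this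
      exact ⟨[], by simp [bitsA]⟩
    · obtain ⟨tl, htl⟩ := ih (m / 2) (Nat.div_lt_self (by omega) (by omega)) (by omega)
      exact ⟨tl ++ [if m % 2 = 1 then '1' else '0'], by rw [htl]; simp⟩

theorem bitsA_mem (m : Nat) (c : Char) (hc : c ∈ bitsA m) : c = '0' ∨ c = '1' := by
  induction m using Nat.strong_induction_on with
  | _ m ih =>
    by_cases h0 : m = 0
    · subst h0; rw [bitsA] at hc; simp at hc
    · rw [bitsA, dif_neg h0] at hc
      rcases List.mem_append.1 hc with h | h
      · exact ih (m / 2) (Nat.div_lt_self (by omega) (by omega)) h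
      · simp at h
        split at h <;> simp [h]

theorem bitsA_pow (j : Nat) : bitsA (2 ^ j) = '1' :: List.replicate j '0' := by
  induction j with
  | zero => simp [bitsA]
  | succ j ih =>
    rw [bitsA, dif_neg (by positivity)]
    have h1 : 2 ^ (j + 1) / 2 = 2 ^ j := by rw [pow_succ]; omega
    have h2 : 2 ^ (j + 1) % 2 = 0 := by rw [pow_succ]; omega
    rw [h1, h2, ih]
    simp [List.replicate_succ' ]

theorem parse_bits (m : Nat) : ∀ (a : Int),
    (bitsA m).foldl (fun a c => 2 * a + (if c == '1' then 1 else 0)) a =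
      a * 2 ^ (bitsA m).length + m := by
  induction m using Nat.strong_induction_on with
  | _ m ih =>
    intro a
    by_cases h0 : m = 0
    · subst h0; rw [bitsA]; simp
    · rw [bitsA, dif_neg h0]
      rw [List.foldl_append, ih (m / 2) (Nat.div_lt_self (by omega) (by omega))]
      simp only [List.length_append, List.length_singleton, List.foldl_cons, List.foldl_nil]
      have : (2 : Int) ^ ((bitsA (m / 2)).length + 1) = 2 ^ (bitsA (m / 2)).length * 2 := pow_succ 2 _
      rw [this]
      by_cases hp : m % 2 = 1
      · rw [if_pos hp]; simp; have : (m : Int) = 2 * (↑m / 2) + 1 := by omega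
        ring_nf
        omega
      · rw [if_neg hp]; simp
        ring_nf
        omega

theorem parse_replicate (j : Nat) : ∀ (a : Int),
    (List.replicate j '0').foldl (fun a c => 2 * a + (if c == '1' then 1 else 0)) a =
      a * 2 ^ j := by
  induction j with
  | zero => simp
  | succ j ih =>
    intro a
    rw [List.replicate_succ, List.foldl_cons, ih]
    simp [pow_succ]
    ring

theorem findSize_eq (d : Nat) : ∀ (fuel a n : Nat), d ≤ fuel →
    (∀ i, i < d → 2 ^ (a + i) < n + 1) → n + 1 ≤ 2 ^ (a + d) →
    findSize fuel (2 ^ a) n = 2 ^ (a + d) := by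
  induction d with
  | zero =>
    intro fuel a n _ _ hub
    cases fuel with
    | zero => simp [findSize]
    | succ f =>
      rw [findSize, if_neg (by simp only [Nat.add_zero] at hub; omega)]
      simp
  | succ d ih =>
    intro fuel a n hf hlo hub
    cases fuel with
    | zero => omega
    | succ f =>
      rw [findSize, if_pos (by have := hlo 0 (by omega); simpa using this)]
      rw [show 2 ^ a + 2 ^ a = 2 ^ (a + 1) by rw [pow_succ]; omega]
      rw [ih f (a + 1) n (by omega) (fun i hi => by
          have := hlo (i + 1) (by omega)
          rwa [show a + (i + 1) = a + 1 + i by omega] at this)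
        (by rwa [show a + 1 + d = a + (d + 1) by omega])]
      rw [show a + 1 + d = a + (d + 1) by omega]

theorem strip_append (l : List Char) : ∀ (r : Char) (rt : List Char), l.length % 2 = 1 →
    strip (l ++ r :: rt) = strip l ++ r :: strip rt := by
  induction l using strip.induct with
  | case1 a b rest ih =>
    intro r rt hl
    simp only [List.length_cons] at hl
    simp only [List.cons_append, strip, ih r rt (by omega)]
  | case2 s h =>
    intro r rt hl
    cases s with
    | nil => simp at hl
    | cons a t =>
      cases t with
      | nil => simp [strip]
      | cons x y => exact absurd rfl (h a x y)

theorem strip_getD (s : List Char) : ∀ (j : Nat) (d : Char),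
    (strip s).getD j d = s.getD (2 * j + 1) d := by
  induction s using strip.induct with
  | case1 a b rest ih =>
    intro j d
    cases j with
    | zero => simp [strip]
    | succ j =>
      simp only [strip]
      rw [List.getD_cons_succ, ih j d]
      rw [show 2 * (j + 1) + 1 = (2 * j + 1) + 1 + 1 by omega]
      simp
  | case2 s h =>
    intro j d
    cases s with
    | nil => simp [strip]
    | cons a t =>
      cases t with
      | nil =>
        simp [strip, List.getD]
      | cons x y => exact absurd rfl (h a x y)

theorem chunk_small (t : List Char) (h : t.length < 3) (ok : Bool) : chunkCheck t ok = ok := by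
  rw [chunkCheck, if_neg (by omega)]

theorem chunk_cons (a b c : Char) (rest : List Char) (ok : Bool) :
    chunkCheck (a :: b :: c :: rest) ok =
      chunkCheck (rest.drop 1)
        (if b == '0' && (a == '1' || c == '1') then false else ok) := by
  conv_lhs => rw [chunkCheck]
  rw [if_pos (by simp only [List.length_cons]; omega)]
  have e1 : PySem.List.pyGetD (a :: b :: c :: rest) 1 'x' = b := by simp [PySem.List.pyGetD_ofNat']
  have e0 : PySem.List.pyGetD (a :: b :: c :: rest) 0 'x' = a := by simp [PySem.List.pyGetD_ofNat']
  have e2 : PySem.List.pyGetD (a :: b :: c :: rest) 2 'x' = c := by simp [PySem.List.pyGetD_ofNat']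
  rw [e1, e0, e2]
  simp only [List.drop_succ_cons]

theorem chunk_acc (n : Nat) : ∀ (t : List Char), t.length ≤ n → ∀ ok,
    chunkCheck t ok = (ok && chunkCheck t true) := by
  induction n with
  | zero =>
    intro t ht ok
    rw [chunk_small t (by omega), chunk_small t (by omega)]
    cases ok <;> simp
  | succ n ih =>
    intro t ht ok
    by_cases h3 : 3 ≤ t.length
    · rcases t with _ | ⟨a, _ | ⟨b, _ | ⟨c, rest⟩⟩⟩ <;> simp at h3
      simp only [List.length_cons] at ht
      rw [chunk_cons, chunk_cons]
      rw [ih (rest.drop 1) (by simp; omega)]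
      rw [ih (rest.drop 1) (by simp; omega)
        (if b == '0' && (a == '1' || c == '1') then false else true)]
      cases ok <;> cases hb : (b == '0' && (a == '1' || c == '1')) <;> simp
    · rw [chunk_small t (by omega), chunk_small t (by omega)]
      cases ok <;> simp

theorem chunk_append (n : Nat) : ∀ (xs : List Char), xs.length ≤ n → xs.length % 4 = 3 →
    ∀ (y : Char) (ys : List Char) (ok : Bool),
    chunkCheck (xs ++ y :: ys) ok = chunkCheck ys (chunkCheck xs ok) := by
  induction n with
  | zero => intro xs h h3; omega
  | succ n ih =>
    intro xs hn h3 y ys ok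
    rcases xs with _ | ⟨a, xs⟩; · simp at h3
    rcases xs with _ | ⟨b, xs⟩; · simp at h3
    rcases xs with _ | ⟨c, rest⟩; · simp at h3
    simp only [List.length_cons] at h3 hn
    rcases rest with _ | ⟨d, rest⟩
    · simp only [List.cons_append, List.nil_append]
      rw [chunk_cons, chunk_cons]
      simp only [List.drop_succ_cons, List.drop_zero, List.drop_nil]
      rw [chunk_small [] (by simp)]
    · simp only [List.cons_append]
      rw [chunk_cons, chunk_cons]
      simp only [List.drop_succ_cons, List.drop_zero]
      simp only [List.length_cons] at h3 hn
      exact ih rest (by omega) (by omega) y ys _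

theorem Vb_small (s : List Char) (h : ¬ 1 < s.length) : Vb s = true := by
  rw [Vb, if_neg h]

theorem Vb_big (s : List Char) (h : 1 < s.length) :
    Vb s = (chunkCheck s true && Vb (strip s)) := by
  conv_lhs => rw [Vb]
  rw [if_pos h]

theorem loopB_acc (n : Nat) : ∀ (s : List Char), s.length ≤ n → ∀ ok,
    loopB s ok = (ok && Vb s) := by
  induction n with
  | zero =>
    intro s hs ok
    rw [loopB, if_neg (by omega), Vb_small s (by omega)]
    simp
  | succ n ih =>
    intro s hs ok
    by_cases h1 : 1 < s.length
    · rw [loopB, if_pos h1, Vb_big s h1]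
      rw [ih (strip s) (by rw [strip_length]; omega)]
      rw [chunk_acc s.length s (le_refl _)]
      simp [Bool.and_assoc]
    · rw [loopB, if_neg h1, Vb_small s h1]
      simp

theorem Vb_node (k : Nat) (hk : 1 ≤ k) : ∀ (l : List Char) (r : Char) (rt : List Char),
    l.length = 2 ^ k - 1 → rt.length = 2 ^ k - 1 →
    Vb (l ++ r :: rt) =
      ((if r == '0' && (l.getD (2 ^ (k - 1) - 1) 'x' == '1' ||
          rt.getD (2 ^ (k - 1) - 1) 'x' == '1') then false else true) && (Vb l && Vb rt)) := by
  induction k, hk using Nat.le_induction with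
  | base =>
    intro l r rt hl hrt
    simp only [pow_one] at hl hrt
    obtain ⟨a, rfl⟩ := List.length_eq_one_iff.1 (by omega : l.length = 1)
    obtain ⟨c, rfl⟩ := List.length_eq_one_iff.1 (by omega : rt.length = 1)
    rw [Vb_big _ (by simp)]
    have hstrip : strip ([a] ++ r :: [c]) = [r] := by simp [strip]
    rw [hstrip, Vb_small [r] (by simp)]
    rw [show ([a] ++ r :: [c]) = a :: r :: c :: [] by simp]
    rw [chunk_cons]
    simp only [List.drop_nil]
    rw [chunk_small [] (by simp)]
    rw [Vb_small [a] (by simp), Vb_small [c] (by simp)]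
    simp
  | succ k hk ih =>
    intro l r rt hl hrt
    obtain ⟨j, rfl⟩ : ∃ j, k = j + 1 := ⟨k - 1, by omega⟩
    simp only [Nat.add_sub_cancel] at ih ⊢
    have p1 : 2 ^ (j + 1 + 1) = 2 * 2 ^ (j + 1) := by rw [pow_succ]; ring
    have p2 : 1 ≤ 2 ^ (j + 1) := Nat.one_le_two_pow
    have p3 : 2 ^ (j + 1) = 2 * 2 ^ j := by rw [pow_succ]; ring
    have p4 : 1 ≤ 2 ^ j := Nat.one_le_two_pow
    have p5 : 2 ^ (j + 1 + 1) = 4 * 2 ^ j := by rw [pow_add]; ring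
    rw [Vb_big _ (by simp [hl]; omega)]
    rw [chunk_append (l.length) l (le_refl _) (by omega) r rt true]
    rw [chunk_acc rt.length rt (le_refl _)]
    rw [strip_append l r rt (by omega)]
    have hsl : (strip l).length = 2 ^ (j + 1) - 1 := by rw [strip_length]; omega
    have hsrt : (strip rt).length = 2 ^ (j + 1) - 1 := by rw [strip_length]; omega
    rw [ih (strip l) r (strip rt) hsl hsrt]
    rw [strip_getD l, strip_getD rt]
    rw [show 2 * (2 ^ j - 1) + 1 = 2 ^ (j + 1) - 1 by omega]
    rw [Vb_big l (by omega), Vb_big rt (by omega)]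
    cases chunkCheck l true <;> cases chunkCheck rt true <;>
      cases Vb (strip l) <;> cases Vb (strip rt) <;>
      cases hc : (r == '0' && (l.getD (2 ^ (j + 1) - 1) 'x' == '1' || rt.getD (2 ^ (j + 1) - 1) 'x' == '1')) <;>
      simp

theorem getD_mid (pre s post : List Char) (j : Nat) (hj : j < s.length) :
    (pre ++ s ++ post).getD (pre.length + j) 'x' = s.getD j 'x' := by
  rw [List.append_assoc, List.getD_append_right _ _ _ _ (by omega)]
  rw [show pre.length + j - pre.length = j by omega]
  exact List.getD_append _ _ _ _ hj

theorem dfs_zero (f : Nat) (hf : 1 ≤ f) (b : List Char) (i : Int) : dfsA f b i 0 = true := by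
  obtain ⟨f, rfl⟩ : ∃ g, f = g + 1 := ⟨f - 1, by omega⟩
  simp [dfsA]

theorem Vb_three (a b c : Char) :
    Vb [a, b, c] = (if b == '0' && (a == '1' || c == '1') then false else true) := by
  rw [Vb_big _ (by simp)]
  have hstrip : strip [a, b, c] = [b] := by simp [strip]
  rw [hstrip, Vb_small [b] (by simp), chunk_cons]
  simp only [List.drop_nil, Bool.and_true]
  rw [chunk_small [] (by simp)]

theorem dfs_eq_Vb (h : Nat) (hh : 2 ≤ h) : ∀ (fuel : Nat), h ≤ fuel →
    ∀ (pre s post : List Char), s.length = 2 ^ h - 1 →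
    dfsA fuel (pre ++ s ++ post) ((pre.length + (2 ^ (h - 1) - 1) : Nat) : Int)
      ((2 ^ (h - 2) : Nat) : Int) = Vb s := by
  induction h, hh using Nat.le_induction with
  | base =>
    intro fuel hf pre s post hs
    obtain ⟨a, b, c, rfl⟩ := List.length_eq_three.1 (by norm_num at hs; exact hs)
    obtain ⟨f, rfl⟩ : ∃ f, fuel = f + 1 := ⟨fuel - 1, by omega⟩
    rw [dfsA]
    rw [show ((2 ^ (2 - 2) : Nat) : Int) = 1 by norm_num]
    rw [show (pre.length + (2 ^ (2 - 1) - 1) : Nat) = pre.length + 1 by norm_num]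
    rw [if_neg (by norm_num)]
    have i1 : ((pre.length + 1 : Nat) : Int) - 1 = ((pre.length + 0 : Nat) : Int) := by
      push_cast; ring
    have i2 : ((pre.length + 1 : Nat) : Int) + 1 = ((pre.length + 2 : Nat) : Int) := by
      push_cast; ring
    rw [i1, i2, PySem.List.pyGetD_natCast, PySem.List.pyGetD_natCast, PySem.List.pyGetD_natCast]
    rw [getD_mid pre _ post 0 (by simp), getD_mid pre _ post 1 (by simp),
      getD_mid pre _ post 2 (by simp)]
    rw [show PySem.Int.floordiv 1 2 = 0 by
      rw [PySem.Int.floordiv_eq_ediv_of_pos (by norm_num)]; decide]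
    rw [dfs_zero f (by omega), dfs_zero f (by omega), Vb_three]
    simp [List.getD]
  | succ h hh ih =>
    intro fuel hf pre s post hs
    obtain ⟨f, rfl⟩ : ∃ f, fuel = f + 1 := ⟨fuel - 1, by omega⟩
    have q1 : 2 ^ (h + 1) = 2 * 2 ^ h := by rw [pow_succ]; ring
    have q2 : 2 ^ h = 2 * 2 ^ (h - 1) := by
      have hp := pow_succ 2 (h - 1)
      rw [show (h - 1) + 1 = h by omega] at hp
      omega
    have q3 : 2 ^ (h - 1) = 2 * 2 ^ (h - 2) := by
      have hp := pow_succ 2 (h - 2)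
      rw [show (h - 2) + 1 = h - 1 by omega] at hp
      omega
    have q4 : (1 : Nat) ≤ 2 ^ (h - 2) := Nat.one_le_two_pow
    -- split s into left subtree, root, right subtree
    set L := 2 ^ h - 1 with hL
    have hdl : (s.drop L).length = 2 ^ h := by rw [List.length_drop, hs]; omega
    obtain ⟨r, rt, hdrop⟩ : ∃ r rt, s.drop L = r :: rt := by
      rcases hd : s.drop L with _ | ⟨r, rt⟩
      · rw [hd] at hdl; simp at hdl; omega
      · exact ⟨_, _, rfl⟩
    have hsplit : s = s.take L ++ r :: rt := by rw [← hdrop, List.take_append_drop]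
    set l := s.take L with hl
    have hllen : l.length = 2 ^ h - 1 := by rw [hl, List.length_take, hs]; omega
    have hrtlen : rt.length = 2 ^ h - 1 := by
      have h2 := hdl
      rw [hdrop] at h2
      simp at h2; omega
    rw [show (h + 1) - 1 = h by omega, show (h + 1) - 2 = h - 1 by omega]
    rw [dfsA]
    rw [if_neg (by simp)]
    -- index arithmetic
    have eL : ((pre.length + (2 ^ h - 1) : Nat) : Int) - ((2 ^ (h - 1) : Nat) : Int) =
        ((pre.length + (2 ^ (h - 1) - 1) : Nat) : Int) := by
      rw [show pre.length + (2 ^ h - 1) = (pre.length + (2 ^ (h - 1) - 1)) + 2 ^ (h - 1) by omega]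
      push_cast; ring
    have eR : ((pre.length + (2 ^ h - 1) : Nat) : Int) + ((2 ^ (h - 1) : Nat) : Int) =
        ((pre.length + (2 ^ h - 1 + 2 ^ (h - 1)) : Nat) : Int) := by push_cast; ring
    rw [eL, eR]
    -- the three characters read
    have g1 : (pre ++ s ++ post).getD (pre.length + (2 ^ h - 1)) 'x' = r := by
      rw [getD_mid pre s post _ (by omega)]
      rw [hsplit, List.getD_append_right _ _ _ _ (by rw [hllen] : l.length ≤ 2 ^ h - 1)]
      rw [hllen]
      simp
    have g2 : (pre ++ s ++ post).getD (pre.length + (2 ^ (h - 1) - 1)) 'x' = l.getD (2 ^ (h - 1) - 1) 'x' := by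
      rw [getD_mid pre s post _ (by omega)]
      rw [hsplit]
      exact List.getD_append _ _ _ _ (by omega)
    have g3 : (pre ++ s ++ post).getD (pre.length + (2 ^ h - 1 + 2 ^ (h - 1))) 'x' = rt.getD (2 ^ (h - 1) - 1) 'x' := by
      rw [getD_mid pre s post _ (by omega)]
      rw [hsplit, List.getD_append_right _ _ _ _ (by omega)]
      rw [show 2 ^ h - 1 + 2 ^ (h - 1) - l.length = (2 ^ (h - 1) - 1) + 1 by omega]
      simp
    rw [PySem.List.pyGetD_natCast, PySem.List.pyGetD_natCast, PySem.List.pyGetD_natCast, g1, g2, g3]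
    -- the recursive depth
    have hfd : PySem.Int.floordiv ((2 ^ (h - 1) : Nat) : Int) 2 = ((2 ^ (h - 2) : Nat) : Int) := by
      rw [show (2 : Int) = ((2 : Nat) : Int) by norm_num, PySem.Int.floordiv_natCast]
      exact_mod_cast congrArg (Nat.cast : Nat → Int) (by omega : 2 ^ (h - 1) / 2 = 2 ^ (h - 2))
    rw [hfd]
    -- the two recursive calls
    have hlist : pre ++ l ++ ((r :: rt) ++ post) = pre ++ s ++ post := by
      rw [hsplit]; simp [List.append_assoc]
    have hrecL : dfsA f (pre ++ s ++ post) ((pre.length + (2 ^ (h - 1) - 1) : Nat) : Int)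
        ((2 ^ (h - 2) : Nat) : Int) = Vb l := by
      have hi := ih f (by omega) pre l ((r :: rt) ++ post) hllen
      rwa [hlist] at hi
    have hlist2 : pre ++ l ++ [r] ++ rt ++ post = pre ++ s ++ post := by
      rw [hsplit]; simp [List.append_assoc]
    have hrecR : dfsA f (pre ++ s ++ post) ((pre.length + (2 ^ h - 1 + 2 ^ (h - 1)) : Nat) : Int)
        ((2 ^ (h - 2) : Nat) : Int) = Vb rt := by
      have hi := ih f (by omega) (pre ++ l ++ [r]) rt post hrtlen
      rw [show (pre ++ l ++ [r]).length = pre.length + (2 ^ h - 1) + 1 by simp [hllen]; omega] at hi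
      rw [show pre.length + (2 ^ h - 1) + 1 + (2 ^ (h - 1) - 1) = pre.length + (2 ^ h - 1 + 2 ^ (h - 1)) by omega] at hi
      rwa [hlist2] at hi
    rw [hrecL, hrecR]
    -- assemble via the Vb decomposition
    conv_rhs => rw [hsplit]
    rw [Vb_node h (by omega) l r rt hllen hrtlen]
    cases hc : (r == '0' && (l.getD (2 ^ (h - 1) - 1) 'x' == '1' || rt.getD (2 ^ (h - 1) - 1) 'x' == '1')) <;>
      simp

theorem pad_eq (b : List Char) (hb : 1 ≤ b.length) :
    padA b = padB b ∧ ∃ k, 1 ≤ k ∧ (padA b).length = 2 ^ k - 1 := by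
  have hnodes : binDigits (b.length + 1) = bitsA (b.length + 1) := by
    rw [binDigits, if_neg (by omega)]
  obtain ⟨hlo, hhi, hL1⟩ := bitsA_bounds (b.length + 1) (by omega)
  obtain ⟨tl, htl⟩ := bitsA_head (b.length + 1) (by omega)
  have hL2 : 2 ≤ (bitsA (b.length + 1)).length := by
    by_contra hcon
    have h2 : 2 ^ (bitsA (b.length + 1)).length ≤ 2 ^ 1 :=
      Nat.pow_le_pow_right (by omega) (by omega)
    omega
  have htll : tl.length = (bitsA (b.length + 1)).length - 1 := by rw [htl]; simp
  have hLb : (bitsA (b.length + 1)).length - 1 < 2 ^ ((bitsA (b.length + 1)).length - 1) :=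
    Nat.lt_two_pow_self
  -- values of the two int(…, 2) parses
  have hpn : parseBin ('0' :: 'b' :: bitsA (b.length + 1)) = ((b.length + 1 : Nat) : Int) := by
    rw [parseBin, List.foldl_cons, List.foldl_cons, if_neg (by decide), if_neg (by decide)]
    rw [show (2 * (2 * (0:Int) + 0) + 0) = 0 by ring, parse_bits]
    simp
  have hone : parseBin ('0' :: 'b' :: '1' ::
      List.replicate (bitsA (b.length + 1)).length '0') = (2 : Int) ^ (bitsA (b.length + 1)).length := by
    rw [parseBin, List.foldl_cons, List.foldl_cons, List.foldl_cons,
      if_neg (by decide), if_neg (by decide), if_pos (by decide)]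
    rw [show (2 * (2 * (2 * (0:Int) + 0) + 0) + 1) = 1 by ring, parse_replicate]
    ring
  have hcast : ((2 ^ (bitsA (b.length + 1)).length : Nat) : Int) = (2:Int) ^ (bitsA (b.length + 1)).length := by
    push_cast; ring
  have hslice : PySem.List.slice (bitsA (b.length + 1)) (some 1) none = tl := by
    rw [PySem.List.slice_from_one, htl]; rfl
  unfold padA padB
  simp only [hslice, hnodes]
  by_cases hc : tl.contains '1'
  · -- b.length + 1 is not a power of two: pad up to 2^L - 1
    have hne : b.length + 1 ≠ 2 ^ ((bitsA (b.length + 1)).length - 1) := by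
      intro he
      have hp := bitsA_pow ((bitsA (b.length + 1)).length - 1)
      rw [← he] at hp
      rw [htl] at hp
      simp only [List.cons.injEq] at hp
      rw [hp.2] at hc
      simp [List.contains_eq_mem, List.mem_replicate] at hc
    have hlt : 2 ^ ((bitsA (b.length + 1)).length - 1) < b.length + 1 := by omega
    have hfs : findSize (b.length + 2) 1 b.length = 2 ^ (bitsA (b.length + 1)).length := by
      have := findSize_eq (bitsA (b.length + 1)).length (b.length + 2) 0 b.length
        (by omega)
        (fun i hi => by
          have : 2 ^ i ≤ 2 ^ ((bitsA (b.length + 1)).length - 1) :=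
            Nat.pow_le_pow_right (by omega) (by omega)
          simp only [Nat.zero_add]
          omega)
        (by simp only [Nat.zero_add]; omega)
      simpa using this
    rw [if_pos hc, hpn, hone, hfs]
    have hcnt : ((2:Int) ^ (bitsA (b.length + 1)).length - ((b.length + 1 : Nat) : Int)).toNat
        = 2 ^ (bitsA (b.length + 1)).length - (b.length + 1) := by omega
    have hcnt2 : (((2 ^ (bitsA (b.length + 1)).length : Nat) : Int) - 1 - ((b.length : Nat) : Int)).toNat
        = 2 ^ (bitsA (b.length + 1)).length - (b.length + 1) := by omega
    constructor
    · rw [hcnt, hcnt2]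
    · exact ⟨(bitsA (b.length + 1)).length, by omega, by simp; omega⟩
  · -- b.length + 1 is a power of two: no padding needed
    have htl0 : tl = List.replicate ((bitsA (b.length + 1)).length - 1) '0' := by
      rw [List.eq_replicate_iff]
      refine ⟨htll, fun c hcm => ?_⟩
      rcases bitsA_mem (b.length + 1) c (by rw [htl]; exact List.mem_cons_of_mem _ hcm) with h0 | h1
      · exact h0
      · exfalso
        rw [h1] at hcm
        simp [List.contains_eq_mem] at hc
        exact hc hcm
    have hpow : b.length + 1 = 2 ^ ((bitsA (b.length + 1)).length - 1) := by
      have hv := parse_bits (b.length + 1) 0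
      simp only [zero_mul, zero_add] at hv
      rw [htl, htl0] at hv
      rw [List.foldl_cons, parse_replicate] at hv
      norm_num at hv
      have hc2 : ((2 ^ ((bitsA (b.length + 1)).length - 1) : Nat) : Int) =
          (2:Int) ^ ((bitsA (b.length + 1)).length - 1) := by push_cast; ring
      omega
    have hfs : findSize (b.length + 2) 1 b.length = 2 ^ ((bitsA (b.length + 1)).length - 1) := by
      have := findSize_eq ((bitsA (b.length + 1)).length - 1) (b.length + 2) 0 b.length
        (by omega)
        (fun i hi => by
          have : 2 ^ i < 2 ^ ((bitsA (b.length + 1)).length - 1) :=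
            (Nat.pow_lt_pow_iff_right (by omega)).2 (by omega)
          simp only [Nat.zero_add]
          omega)
        (by simp only [Nat.zero_add]; omega)
      simpa using this
    rw [if_neg (by simpa using hc), hfs]
    constructor
    · rw [show (((2 ^ ((bitsA (b.length + 1)).length - 1) : Nat) : Int) - 1 - ((b.length : Nat) : Int)).toNat = 0 by omega]
      simp
    · exact ⟨(bitsA (b.length + 1)).length - 1, by omega, by omega⟩

theorem solveOne_eq (num : Int) : solveOneA num = checkB num := by
  unfold solveOneA checkB
  have hb : 1 ≤ (PySem.List.slice (pyBin num) (some 2) none).length := by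
    have hs2 := PySem.List.slice_from_natCast (pyBin num) 2
    norm_num at hs2
    rw [hs2]
    unfold pyBin
    split
    · simp
    · simp only [List.drop_succ_cons, List.drop_zero, binDigits]
      split
      · simp
      · have := bitsA_bounds (Int.toNat num) ?_
        · omega
        · rename_i hnum hz
          omega
  obtain ⟨heq, k, hk, hlen⟩ := pad_eq _ hb
  show (if dfsA (padA (PySem.List.slice (pyBin num) (some 2) none)).length
      (padA (PySem.List.slice (pyBin num) (some 2) none))
      (PySem.Int.floordiv ((padA (PySem.List.slice (pyBin num) (some 2) none)).length : Int) 2)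
      (PySem.Int.floordiv (((padA (PySem.List.slice (pyBin num) (some 2) none)).length : Int) + 1) 4)
    then 1 else 0) =
    (if loopB (padB (PySem.List.slice (pyBin num) (some 2) none)) true then 1 else 0)
  rw [← heq]
  have hloop : loopB (padA (PySem.List.slice (pyBin num) (some 2) none)) true =
      Vb (padA (PySem.List.slice (pyBin num) (some 2) none)) := by
    rw [loopB_acc (padA _).length _ (le_refl _)]
    simp
  rw [hloop]
  set s := padA (PySem.List.slice (pyBin num) (some 2) none) with hsdef
  by_cases hk1 : k = 1
  · subst hk1
    have hs1 : s.length = 1 := by omega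
    rw [hs1]
    rw [show PySem.Int.floordiv ((1:Nat):Int) 2 = 0 by
      rw [PySem.Int.floordiv_eq_ediv_of_pos (by norm_num)]; decide]
    rw [show ((1:Nat):Int) + 1 = (2:Int) by norm_num]
    rw [show PySem.Int.floordiv (2:Int) 4 = 0 by
      rw [PySem.Int.floordiv_eq_ediv_of_pos (by norm_num)]; decide]
    rw [dfs_zero 1 (by omega), Vb_small s (by omega)]
  · have hk2 : 2 ≤ k := by omega
    have r1 : 2 ^ k = 2 * 2 ^ (k - 1) := by
      have hp := pow_succ 2 (k - 1)
      rw [show (k - 1) + 1 = k by omega] at hp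
      omega
    have r2 : 2 ^ (k - 1) = 2 * 2 ^ (k - 2) := by
      have hp := pow_succ 2 (k - 2)
      rw [show (k - 2) + 1 = k - 1 by omega] at hp
      omega
    have r3 : (1:Nat) ≤ 2 ^ (k - 2) := Nat.one_le_two_pow
    have hfd1 : PySem.Int.floordiv ((s.length : Nat) : Int) 2 = ((2 ^ (k - 1) - 1 : Nat) : Int) := by
      rw [show (2:Int) = ((2:Nat):Int) by norm_num, PySem.Int.floordiv_natCast]
      exact_mod_cast congrArg (Nat.cast : Nat → Int) (by omega : s.length / 2 = 2 ^ (k - 1) - 1)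
    have hfd2 : PySem.Int.floordiv (((s.length : Nat) : Int) + 1) 4 = ((2 ^ (k - 2) : Nat) : Int) := by
      rw [show ((s.length : Nat) : Int) + 1 = ((s.length + 1 : Nat) : Int) by push_cast; ring]
      rw [show (4:Int) = ((4:Nat):Int) by norm_num, PySem.Int.floordiv_natCast]
      exact_mod_cast congrArg (Nat.cast : Nat → Int) (by omega : (s.length + 1) / 4 = 2 ^ (k - 2))
    rw [hfd1, hfd2]
    have hfuel : k ≤ s.length := by
      have : k < 2 ^ k := Nat.lt_two_pow_self
      omega
    have hd := dfs_eq_Vb k hk2 s.length hfuel [] s []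
      (by simpa using hlen)
    simp only [List.nil_append, List.append_nil, List.length_nil, Nat.zero_add] at hd
    rw [hd]



-- ===== VERDICT (by name: the statement is the Claim_ definition above) =====
theorem solution_spec : Claim_equal_solution := by
  intro numbers _
  unfold Spec_solution solution solution_alt
  rw [PySem.List.foldl_append_singleton_eq_map]
  simp [solveOne_eq]
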